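-- pv_equiv track=rewrite | github.com/microsoft/ai-edu | 基础教程/A4-经典机器学习算法（更新中）/第1步 回归算法/src/a.py | abcd
-- ===== SOURCE A (Python) =====
-- def abcd(input):
--     count = len(input)
--     result = []
--     for i in range(0,count):
--         # copy the existing units
--         result_backup = result[:]
--         # append new char (input[i]) to all the existing result
--         # e.g. a,b,ab->ac,bc,abc
--         for j in range(len(result)):
--             result[j] = result[j] + input[i]
--         # a,b,ab "+" ac,bc,abc
--         result.extend(result_backup)
--         # append 'c'
--         result.append(input[i])
--     return result
-- ===== SOURCE B (Python) =====
-- def abcd(input):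
--     def helper(k):
--         if k == 0:
--             return []
--         prev = helper(k - 1)
--         c = input[k - 1]
--         return [s + c for s in prev] + prev + [c]
--     return helper(len(input))
-- ===== Notes on version B (the rewrite author's own statement) =====
-- stated objective: simpler
-- what changed: Replaces A's in-place mutation loop with backup/extend by a pure recursion over the prefix length that builds each stage functionally (comprehension ++ prev ++ singleton).
import Mathlib
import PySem

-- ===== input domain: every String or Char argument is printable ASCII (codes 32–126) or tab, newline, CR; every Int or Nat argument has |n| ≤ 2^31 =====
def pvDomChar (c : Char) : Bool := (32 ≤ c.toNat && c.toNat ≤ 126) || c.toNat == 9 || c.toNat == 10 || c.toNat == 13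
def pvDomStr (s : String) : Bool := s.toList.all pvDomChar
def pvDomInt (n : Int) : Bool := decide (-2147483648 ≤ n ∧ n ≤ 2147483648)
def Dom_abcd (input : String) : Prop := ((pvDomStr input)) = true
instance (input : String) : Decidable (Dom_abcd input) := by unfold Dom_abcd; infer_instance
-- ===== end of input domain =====

-- B replaces A's in-place mutation loop (backup/extend/append) by a pure recursion over the prefix length; same cost.

-- ===== PORT A =====
-- for i in range(count): backup; for j: result[j] += input[i]; result.extend(backup); result.append(input[i])
def abcd (input : String) : List String :=
  let cs := input.toList
  let count := cs.length
  (List.range count).foldl (fun result i =>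
    let result_backup := result
    let result' := (List.range result.length).foldl
      (fun r j => r.set j ((r.getD j "").push (cs.getD i ' '))) result
    (result' ++ result_backup) ++ [String.ofList [cs.getD i ' ']]) []

-- ===== PORT B =====
def abcdAltHelper (cs : List Char) (k : Nat) : List String :=
  match k with
  | 0 => []
  | Nat.succ k' =>
    let prev := abcdAltHelper cs k'
    let c := cs.getD k' ' '
    (prev.map (fun s => s.push c)) ++ prev ++ [String.ofList [c]]

def abcd_alt (input : String) : List String :=
  abcdAltHelper input.toList input.toList.length

-- ===== PRECONDITION & SPEC =====
def Spec_abcd (input : String) (out : List String) : Prop := out = abcd_alt input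
instance (input : String) (out : List String) : Decidable (Spec_abcd input out) := by unfold Spec_abcd; infer_instance

-- ===== CLAIM (what is proved, stated in full; the proofs are below) =====
def Claim_equal_abcd : Prop := ∀ (input : String), Dom_abcd input → Spec_abcd input (abcd input)

-- ===== LEMMAS AND PROOFS =====

-- A's inner index loop maps push over the prefix processed so far.
theorem abcd_inner (c : Char) (m : Nat) :
    ∀ (l : List String), m ≤ l.length →
    (List.range m).foldl (fun r j => r.set j ((r.getD j "").push c)) l
      = (l.take m).map (fun s => s.push c) ++ l.drop m := by
  induction m with
  | zero => intro l _; simp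
  | succ m ih =>
    intro l h
    rw [List.range_succ, List.foldl_append, ih l (Nat.le_of_succ_le h)]
    simp only [List.foldl_cons, List.foldl_nil]
    have hm : ((l.take m).map (fun s => s.push c)).length = m := by
      simp [Nat.min_eq_left (Nat.le_of_succ_le h)]
    obtain ⟨x, xs, hd⟩ : ∃ x xs, l.drop m = x :: xs := by
      cases hdrop : l.drop m with
      | nil => exfalso; have := List.drop_eq_nil_iff.mp hdrop; omega
      | cons x xs => exact ⟨x, xs, rfl⟩
    rw [hd]
    rw [List.getD_append_right _ _ _ _ (by omega), List.set_append_right _ _ (by omega), hm]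
    simp only [Nat.sub_self, List.getD_cons_zero, List.set_cons_zero]
    have htake : l.take (m + 1) = l.take m ++ [x] := by
      rw [List.take_add_one]
      have hx : l[m]? = some x := by
        have := congrArg (fun t => t[0]?) hd
        simpa using this
      simp [hx]
    have hdrop1 : l.drop (m + 1) = xs := by
      have : l.drop (m+1) = (l.drop m).drop 1 := by rw [List.drop_drop]
      simp [this, hd]
    rw [htake, hdrop1]
    simp

-- A's outer fold over range k equals B's helper at k.
theorem abcd_outer (cs : List Char) (k : Nat) :
    (List.range k).foldl (fun result i =>
      let result_backup := result
      let result' := (List.range result.length).foldl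
        (fun r j => r.set j ((r.getD j "").push (cs.getD i ' '))) result
      (result' ++ result_backup) ++ [String.ofList [cs.getD i ' ']]) []
      = abcdAltHelper cs k := by
  induction k with
  | zero => simp [abcdAltHelper]
  | succ k ih =>
    rw [List.range_succ, List.foldl_append, ih]
    simp only [List.foldl_cons, List.foldl_nil]
    rw [abcd_inner (cs.getD k ' ') (abcdAltHelper cs k).length _ (le_refl _)]
    simp [abcdAltHelper]

-- ===== VERDICT (by name: the statement is the Claim_ definition above) =====
theorem abcd_spec : Claim_equal_abcd := by
  intro input _
  unfold Spec_abcd abcd abcd_alt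
  exact abcd_outer input.toList input.toList.length
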